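-- pv_equiv track=rewrite | github.com/ClanClanClanClan/latex_perf | ml/data/feature_extract.py | compute_line_features
-- ===== SOURCE A (Python) =====
-- from typing import List, Dict, Tuple, Optional, Any
--
-- def compute_line_features(text: str) -> List[Dict[str, int]]:
--     """Compute per-character line-level features."""
--     lines = text.split('\n')
--     features = []
--     for line_idx, line in enumerate(lines):
--         line_len = len(line)
--         leading_ws = len(line) - len(line.lstrip())
--         for pos_in_line in range(len(line)):
--             features.append({
--                 "line_idx": line_idx,
--                 "line_length": line_len,
--                 "pos_in_line": pos_in_line,
--                 "leading_whitespace": leading_ws,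
--             })
--         # Newline character (except last line)
--         if line_idx < len(lines) - 1:
--             features.append({
--                 "line_idx": line_idx,
--                 "line_length": line_len,
--                 "pos_in_line": line_len,
--                 "leading_whitespace": leading_ws,
--             })
--
--     # Pad if needed (should match text length)
--     while len(features) < len(text):
--         features.append({
--             "line_idx": -1,
--             "line_length": 0,
--             "pos_in_line": 0,
--             "leading_whitespace": 0,
--         })
--
--     return features[:len(text)]
-- ===== SOURCE B (Python) =====
-- def compute_line_features(text: str):
--     """One pass over the characters, with per-line metadata precomputed once."""
--     metas = [(len(l), len(l) - len(l.lstrip())) for l in text.split('\n')]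
--     out = []
--     idx = 0
--     pos = 0
--     for ch in text:
--         length, ws = metas[idx]
--         if ch == '\n':
--             out.append({"line_idx": idx, "line_length": length,
--                         "pos_in_line": length, "leading_whitespace": ws})
--             idx += 1
--             pos = 0
--         else:
--             out.append({"line_idx": idx, "line_length": length,
--                         "pos_in_line": pos, "leading_whitespace": ws})
--             pos += 1
--     return out
-- ===== Notes on version B (the rewrite author's own statement) =====
-- stated objective: simpler
-- what changed: B replaces A's per-line double loop plus the pad/truncate pass by a single pass over the characters of the text, with per-line (length, leading whitespace) metadata precomputed once; the pad/truncate step disappears because the emitted count is exactly len(text).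
import Mathlib
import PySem

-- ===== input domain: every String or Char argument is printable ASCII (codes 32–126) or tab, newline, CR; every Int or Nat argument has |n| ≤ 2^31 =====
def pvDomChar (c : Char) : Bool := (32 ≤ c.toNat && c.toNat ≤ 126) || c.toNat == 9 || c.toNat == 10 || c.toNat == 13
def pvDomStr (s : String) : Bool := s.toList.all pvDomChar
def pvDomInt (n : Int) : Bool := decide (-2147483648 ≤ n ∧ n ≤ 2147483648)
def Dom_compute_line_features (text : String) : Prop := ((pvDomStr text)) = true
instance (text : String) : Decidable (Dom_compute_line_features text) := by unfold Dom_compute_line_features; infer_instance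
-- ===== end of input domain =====

-- B replaces A's per-line double loop plus pad/truncate pass by one pass over the characters
-- with per-line metadata precomputed once (objective: simpler decomposition, same cost).

-- the feature dict {"line_idx": li, "line_length": ll, "pos_in_line": pos, "leading_whitespace": lw}
def pvFeat (li ll pos lw : Int) : List (String × Int) :=
  [("line_idx", li), ("line_length", ll), ("pos_in_line", pos), ("leading_whitespace", lw)]

-- ===== PORT A =====
-- the 'while len(features) < len(text): features.append(...)' loop, literally
def pvPadLoop (target : Nat) (features : List (List (String × Int))) : List (List (String × Int)) :=
  if features.length < target then
    pvPadLoop target (features ++ [pvFeat (-1) 0 0 0])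
  else features
termination_by target - features.length
decreasing_by simp; omega

def compute_line_features (text : String) : List (List (String × Int)) :=
  let lines := PySem.Chars.splitOn text.toList ['\n']
  let features : List (List (String × Int)) :=
    (PySem.List.enumerate lines).foldl (fun acc p =>
      let lineLen : Int := PySem.Chars.len p.2
      let leadingWs : Int := PySem.Chars.len p.2 - PySem.Chars.len (PySem.Chars.lstrip p.2)
      let acc := acc ++ (PySem.List.pyRange 0 (PySem.Chars.len p.2) 1).map
          (fun pos => pvFeat p.1 lineLen pos leadingWs)
      if p.1 < (lines.length : Int) - 1 then
        acc ++ [pvFeat p.1 lineLen lineLen leadingWs]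
      else acc) []
  let features := pvPadLoop text.toList.length features
  PySem.List.slice features none (some (PySem.Chars.len text.toList))

-- ===== PORT B =====
def compute_line_features_alt (text : String) : List (List (String × Int)) :=
  let metas := (PySem.Chars.splitOn text.toList ['\n']).map
    (fun l => (PySem.Chars.len l, PySem.Chars.len l - PySem.Chars.len (PySem.Chars.lstrip l)))
  (text.toList.foldl (fun (st : Nat × Int × List (List (String × Int))) ch =>
      let m := metas.getD st.1 (0, 0)
      if ch = '\n' then (st.1 + 1, 0, st.2.2 ++ [pvFeat st.1 m.1 m.1 m.2])
      else (st.1, st.2.1 + 1, st.2.2 ++ [pvFeat st.1 m.1 st.2.1 m.2]))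
    (0, 0, [])).2.2

-- ===== PRECONDITION & SPEC =====
def Spec_compute_line_features (text : String) (out : List (List (String × Int))) : Prop := out = compute_line_features_alt text
instance (text : String) (out : List (List (String × Int))) : Decidable (Spec_compute_line_features text out) := by unfold Spec_compute_line_features; infer_instance

-- ===== CLAIM (what is proved, stated in full; the proofs are below) =====
def Claim_equal_compute_line_features : Prop := ∀ (text : String), Dom_compute_line_features text → Spec_compute_line_features text (compute_line_features text)

-- ===== LEMMAS AND PROOFS =====

-- reference line splitter: what text.split('\n') computes, in a shape fit for induction
def linesF : List Char → List (List Char)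
  | [] => [[]]
  | c :: rest =>
    if c = '\n' then [] :: linesF rest
    else
      match linesF rest with
      | [] => [[c]]
      | x :: xs => (c :: x) :: xs

-- joining the lines back with '\n'
def joinNL : List (List Char) → List Char
  | [] => []
  | [x] => x
  | x :: y :: r => x ++ '\n' :: joinNL (y :: r)

def metaOf (l : List Char) : Int × Int :=
  (PySem.Chars.len l, PySem.Chars.len l - PySem.Chars.len (PySem.Chars.lstrip l))

def emitLine (i : Int) (l : List Char) (nl : Bool) : List (List (String × Int)) :=
  (List.range l.length).map (fun (k : Nat) => pvFeat i (metaOf l).1 (k : Int) (metaOf l).2)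
  ++ (if nl then [pvFeat i (metaOf l).1 (metaOf l).1 (metaOf l).2] else [])

def gen (i : Int) : List (List Char) → List (List (String × Int))
  | [] => []
  | [l] => emitLine i l false
  | l :: l' :: r => emitLine i l true ++ gen (i + 1) (l' :: r)

def genT (total : Nat) (i : Int) : List (List Char) → List (List (String × Int))
  | [] => []
  | l :: r => emitLine i l (decide (i < (total : Int) - 1)) ++ genT total (i + 1) r

lemma joinNL_cons_cons (x y : List Char) (r : List (List Char)) :
    joinNL (x :: y :: r) = x ++ '\n' :: joinNL (y :: r) := rfl

lemma joinNL_one (x : List Char) : joinNL [x] = x := rfl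

lemma gen_one (i : Int) (l : List Char) : gen i [l] = emitLine i l false := rfl

lemma gen_cons2 (i : Int) (l l' : List Char) (r : List (List Char)) :
    gen i (l :: l' :: r) = emitLine i l true ++ gen (i + 1) (l' :: r) := rfl

lemma genT_nil (total : Nat) (i : Int) : genT total i [] = [] := rfl

lemma genT_cons (total : Nat) (i : Int) (l : List Char) (r : List (List Char)) :
    genT total i (l :: r) = emitLine i l (decide (i < (total : Int) - 1)) ++ genT total (i + 1) r := rfl

-- the fold bodies of the two ports, named
def fA (lines : List (List Char)) (acc : List (List (String × Int))) (p : Int × List Char) :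
    List (List (String × Int)) :=
  let lineLen : Int := PySem.Chars.len p.2
  let leadingWs : Int := PySem.Chars.len p.2 - PySem.Chars.len (PySem.Chars.lstrip p.2)
  let acc := acc ++ (PySem.List.pyRange 0 (PySem.Chars.len p.2) 1).map
      (fun pos => pvFeat p.1 lineLen pos leadingWs)
  if p.1 < (lines.length : Int) - 1 then
    acc ++ [pvFeat p.1 lineLen lineLen leadingWs]
  else acc

def fB (metas : List (Int × Int)) (st : Nat × Int × List (List (String × Int))) (ch : Char) :
    Nat × Int × List (List (String × Int)) :=
  let m := metas.getD st.1 (0, 0)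
  if ch = '\n' then (st.1 + 1, 0, st.2.2 ++ [pvFeat st.1 m.1 m.1 m.2])
  else (st.1, st.2.1 + 1, st.2.2 ++ [pvFeat st.1 m.1 st.2.1 m.2])

lemma A_unfold (text : String) :
    compute_line_features text =
      PySem.List.slice
        (pvPadLoop text.toList.length
          ((PySem.List.enumerate (PySem.Chars.splitOn text.toList ['\n'])).foldl
            (fA (PySem.Chars.splitOn text.toList ['\n'])) []))
        none (some (PySem.Chars.len text.toList)) := rfl

lemma alt_unfold (text : String) :
    compute_line_features_alt text =
      (text.toList.foldl (fB ((PySem.Chars.splitOn text.toList ['\n']).map metaOf)) (0, 0, [])).2.2 := rfl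

lemma linesF_ne_nil (l : List Char) : linesF l ≠ [] := by
  induction l with
  | nil => simp [linesF]
  | cons c rest ih =>
    by_cases hc : c = '\n'
    · simp [linesF, hc]
    · simp only [linesF, if_neg hc]
      cases h : linesF rest <;> simp

lemma go_spec : ∀ (fuel : Nat) (l cur : List Char) (acc : List (List Char)), l.length < fuel →
    PySem.Chars.splitOn.go ['\n'] fuel l cur acc
      = acc.reverse ++ ((cur.reverse ++ (linesF l).headI) :: (linesF l).tail) := by
  intro fuel
  induction fuel with
  | zero => intro l cur acc h; omega
  | succ f ih =>
    intro l cur acc h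
    cases l with
    | nil => simp [PySem.Chars.splitOn.go, linesF]
    | cons c rest =>
      by_cases hc : c = '\n'
      · subst hc
        rw [PySem.Chars.splitOn.go]
        simp only [List.isPrefixOf, beq_self_eq_true, Bool.true_and, if_pos,
          List.length_cons, List.length_nil, List.drop_succ_cons, List.drop_zero]
        rw [ih rest [] _ (by simpa using Nat.lt_of_succ_lt_succ h)]
        obtain ⟨x, xs, hx⟩ : ∃ x xs, linesF rest = x :: xs := by
          cases hr : linesF rest with
          | nil => exact absurd hr (linesF_ne_nil rest)
          | cons x xs => exact ⟨x, xs, rfl⟩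
        simp [linesF, hx]
      · rw [PySem.Chars.splitOn.go]
        have hpre : List.isPrefixOf ['\n'] (c :: rest) = false := by
          simp [List.isPrefixOf]
          exact fun hcc => absurd hcc.symm hc
        rw [if_neg (by simp [hpre])]
        rw [ih rest (c :: cur) acc (by simpa using Nat.lt_of_succ_lt_succ h)]
        obtain ⟨x, xs, hx⟩ : ∃ x xs, linesF rest = x :: xs := by
          cases hr : linesF rest with
          | nil => exact absurd hr (linesF_ne_nil rest)
          | cons x xs => exact ⟨x, xs, rfl⟩
        simp [linesF, if_neg hc, hx]

lemma splitOn_nl (l : List Char) : PySem.Chars.splitOn l ['\n'] = linesF l := by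
  show PySem.Chars.splitOn.go ['\n'] (l.length + 1) l [] [] = linesF l
  rw [go_spec (l.length + 1) l [] [] (by omega)]
  obtain ⟨x, xs, hx⟩ : ∃ x xs, linesF l = x :: xs := by
    cases hr : linesF l with
    | nil => exact absurd hr (linesF_ne_nil l)
    | cons x xs => exact ⟨x, xs, rfl⟩
  simp [hx]

lemma joinNL_cons_head (c : Char) (x : List Char) (xs : List (List Char)) :
    joinNL ((c :: x) :: xs) = c :: joinNL (x :: xs) := by
  cases xs <;> simp [joinNL]

lemma joinNL_linesF : ∀ l : List Char, joinNL (linesF l) = l := by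
  intro l
  induction l with
  | nil => simp [linesF, joinNL]
  | cons c rest ih =>
    by_cases hc : c = '\n'
    · subst hc
      obtain ⟨x, xs, hx⟩ : ∃ x xs, linesF rest = x :: xs := by
        cases hr : linesF rest with
        | nil => exact absurd hr (linesF_ne_nil rest)
        | cons x xs => exact ⟨x, xs, rfl⟩
      have hstep : linesF ('\n' :: rest) = [] :: linesF rest := by simp [linesF]
      rw [hstep, hx, joinNL_cons_cons, ← hx, ih]
      simp
    · obtain ⟨x, xs, hx⟩ : ∃ x xs, linesF rest = x :: xs := by
        cases hr : linesF rest with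
        | nil => exact absurd hr (linesF_ne_nil rest)
        | cons x xs => exact ⟨x, xs, rfl⟩
      simp only [linesF, if_neg hc, hx]
      rw [joinNL_cons_head, ← hx, ih]

lemma no_nl : ∀ (l : List Char) (x : List Char), x ∈ linesF l → '\n' ∉ x := by
  intro l
  induction l with
  | nil => intro x hx; simp [linesF] at hx; simp [hx]
  | cons c rest ih =>
    intro x hx
    by_cases hc : c = '\n'
    · rw [linesF, if_pos hc] at hx
      rcases List.mem_cons.mp hx with h | h
      · simp [h]
      · exact ih x h
    · obtain ⟨y, ys, hy⟩ : ∃ y ys, linesF rest = y :: ys := by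
        cases hr : linesF rest with
        | nil => exact absurd hr (linesF_ne_nil rest)
        | cons y ys => exact ⟨y, ys, rfl⟩
      rw [linesF, if_neg hc, hy] at hx
      rcases List.mem_cons.mp hx with h | h
      · subst h
        intro hm
        rcases List.mem_cons.mp hm with h' | h'
        · exact hc h'.symm
        · exact ih y (hy ▸ List.mem_cons_self) h'
      · exact ih x (hy ▸ List.mem_cons_of_mem y h)

lemma enumerate_cons {α : Type} (x : α) (xs : List α) (i : Int) :
    PySem.List.enumerate (x :: xs) i = (i, x) :: PySem.List.enumerate xs (i + 1) := by
  simp [PySem.List.enumerate]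

lemma fA_eq (lines : List (List Char)) (acc : List (List (String × Int))) (i : Int) (l : List Char) :
    fA lines acc (i, l) = acc ++ emitLine i l (decide (i < (lines.length : Int) - 1)) := by
  simp only [fA, emitLine, metaOf, PySem.Chars.len]
  rw [show ((l.length : Int)) = ((l.length : Nat) : Int) from rfl, PySem.List.pyRange_zero_natCast,
    List.map_map]
  simp only [Function.comp_def]
  by_cases h : i < ((lines.length : Nat) : Int) - 1
  · simp [h, List.append_assoc]
  · simp [h]

lemma foldA (lines : List (List Char)) :
    ∀ (ls : List (List Char)) (i : Int) (acc : List (List (String × Int))),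
      List.foldl (fA lines) acc (PySem.List.enumerate ls i) = acc ++ genT lines.length i ls := by
  intro ls
  induction ls with
  | nil => intro i acc; simp [genT_nil, PySem.List.enumerate]
  | cons l r ih =>
    intro i acc
    rw [enumerate_cons]
    simp only [List.foldl_cons]
    rw [fA_eq, ih, genT]
    simp [List.append_assoc]

lemma genT_eq_gen : ∀ (ls : List (List Char)) (i : Int) (total : Nat),
    i + (ls.length : Int) = total → genT total i ls = gen i ls := by
  intro ls
  induction ls with
  | nil => intro i total _; simp [genT, gen]
  | cons l r ih =>
    intro i total h
    cases r with
    | nil =>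
      have hb : decide (i < (total : Int) - 1) = false := by
        simp only [List.length_cons, List.length_nil] at h
        push_cast at h
        simp only [decide_eq_false_iff_not]
        omega
      rw [genT_cons, hb, gen_one, genT_nil, List.append_nil]
    | cons l' r' =>
      have h' : (i + 1) + ((l' :: r').length : Int) = total := by
        simp only [List.length_cons] at h ⊢
        push_cast at h ⊢
        omega
      have hb : decide (i < (total : Int) - 1) = true := by
        simp only [List.length_cons] at h
        push_cast at h
        simp only [decide_eq_true_eq]
        omega
      rw [genT_cons, hb, gen_cons2, ih (i + 1) total h']

lemma length_gen : ∀ (ls : List (List Char)) (i : Int), (gen i ls).length = (joinNL ls).length := by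
  intro ls
  induction ls with
  | nil => intro i; simp [gen, joinNL]
  | cons l r ih =>
    intro i
    cases r with
    | nil => simp [gen_one, joinNL, emitLine]
    | cons l' r' =>
      rw [gen_cons2, joinNL_cons_cons]
      simp [emitLine, ih]

lemma pvPadLoop_of_ge (target : Nat) (fs : List (List (String × Int))) (h : target ≤ fs.length) :
    pvPadLoop target fs = fs := by
  rw [pvPadLoop, if_neg (by omega)]

lemma getD_append_self (pre : List (Int × Int)) (y : Int × Int) (ys : List (Int × Int)) :
    (pre ++ y :: ys).getD pre.length (0, 0) = y := by
  simp [List.getD]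

lemma foldB_line (metas : List (Int × Int)) :
    ∀ (l : List Char), '\n' ∉ l → ∀ (i : Nat) (pos : Int) (out : List (List (String × Int))),
      List.foldl (fB metas) (i, pos, out) l
        = (i, pos + (l.length : Int),
            out ++ (List.range l.length).map
              (fun (k : Nat) => pvFeat i (metas.getD i (0, 0)).1 (pos + (k : Int)) (metas.getD i (0, 0)).2)) := by
  intro l
  induction l with
  | nil => intro _ i pos out; simp
  | cons c rest ih =>
    intro h i pos out
    have hc : c ≠ '\n' := fun hcc => h (hcc ▸ List.mem_cons_self)
    have hrest : '\n' ∉ rest := fun hm => h (List.mem_cons_of_mem c hm)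
    simp only [List.foldl_cons]
    rw [show fB metas (i, pos, out) c
        = (i, pos + 1, out ++ [pvFeat i (metas.getD i (0, 0)).1 pos (metas.getD i (0, 0)).2]) by
      simp [fB, hc]]
    rw [ih hrest i (pos + 1) _]
    refine Prod.ext rfl (Prod.ext ?_ ?_)
    · simp only [List.length_cons]
      push_cast
      ring
    · simp only [List.length_cons, List.range_succ_eq_map, List.map_cons, List.map_map]
      simp only [List.append_assoc, List.cons_append, List.nil_append, Nat.cast_zero, add_zero]
      congr 2
      refine List.map_congr_left fun k _ => ?_
      simp only [Function.comp_def]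
      congr 1
      push_cast
      ring

lemma foldB_main : ∀ (ls : List (List Char)) (hne : ls ≠ []) (pre : List (Int × Int))
    (out : List (List (String × Int))), (∀ x ∈ ls, '\n' ∉ x) →
    List.foldl (fB (pre ++ ls.map metaOf)) (pre.length, 0, out) (joinNL ls)
      = (pre.length + ls.length - 1, ((ls.getLast hne).length : Int),
          out ++ gen (pre.length : Int) ls) := by
  intro ls
  induction ls with
  | nil => intro hne; exact absurd rfl hne
  | cons l r ih =>
    intro hne pre out hnl
    have hl : '\n' ∉ l := hnl l List.mem_cons_self
    cases r with
    | nil =>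
      simp only [joinNL_one, List.map_cons, List.map_nil]
      rw [foldB_line _ l hl pre.length 0 out]
      rw [getD_append_self]
      simp [gen_one, emitLine, metaOf, PySem.Chars.len]
    | cons l' r' =>
      have hr : (l' :: r') ≠ [] := by simp
      have hjoin : joinNL (l :: l' :: r') = l ++ '\n' :: joinNL (l' :: r') := rfl
      rw [hjoin, List.foldl_append]
      rw [foldB_line _ l hl pre.length 0 out]
      simp only [List.foldl_cons]
      rw [show ∀ st : Nat × Int × List (List (String × Int)),
            fB (pre ++ (l :: l' :: r').map metaOf) st '\n'
              = (st.1 + 1, 0, st.2.2 ++ [pvFeat st.1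
                  (((pre ++ (l :: l' :: r').map metaOf)).getD st.1 (0, 0)).1
                  (((pre ++ (l :: l' :: r').map metaOf)).getD st.1 (0, 0)).1
                  (((pre ++ (l :: l' :: r').map metaOf)).getD st.1 (0, 0)).2]) from
        fun st => by simp [fB]]
      have hmet : ((pre ++ (l :: l' :: r').map metaOf)).getD pre.length (0, 0) = metaOf l := by
        rw [List.map_cons]
        exact getD_append_self pre (metaOf l) ((l' :: r').map metaOf)
      have hassoc : pre ++ (l :: l' :: r').map metaOf
          = (pre ++ [metaOf l]) ++ (l' :: r').map metaOf := by simp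
      rw [hmet]
      rw [hassoc]
      have hlen1 : pre.length + 1 = (pre ++ [metaOf l]).length := by simp
      rw [show (pre.length + 1 : Nat) = (pre ++ [metaOf l]).length from hlen1]
      rw [ih hr (pre ++ [metaOf l]) _ (fun x hx => hnl x (List.mem_cons_of_mem l hx))]
      refine Prod.ext ?_ (Prod.ext ?_ ?_)
      · simp; omega
      · simp [List.getLast_cons hr]
      · show _ ++ _ = out ++ gen (pre.length : Int) (l :: l' :: r')
        rw [gen_cons2]
        simp [emitLine, List.append_assoc]

-- ===== VERDICT (by name: the statement is the Claim_ definition above) =====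
theorem compute_line_features_spec : Claim_equal_compute_line_features := by
  intro text _
  unfold Spec_compute_line_features
  have hs := splitOn_nl text.toList
  have hjoin := joinNL_linesF text.toList
  have hB : compute_line_features_alt text = gen 0 (linesF text.toList) := by
    rw [alt_unfold, hs]
    have h := foldB_main (linesF text.toList) (linesF_ne_nil _) [] []
      (no_nl text.toList)
    simp only [List.nil_append, List.length_nil] at h
    rw [hjoin] at h
    rw [h]
    simp
  have hA : compute_line_features text = gen 0 (linesF text.toList) := by
    rw [A_unfold, hs]
    rw [foldA (linesF text.toList) (linesF text.toList) 0 []]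
    rw [genT_eq_gen _ 0 _ (by simp)]
    simp only [List.nil_append]
    have hlen : (gen 0 (linesF text.toList)).length = text.toList.length := by
      rw [length_gen, hjoin]
    rw [pvPadLoop_of_ge _ _ (le_of_eq hlen.symm)]
    rw [show PySem.Chars.len text.toList = ((text.toList.length : Nat) : Int) from rfl]
    rw [PySem.List.slice_to_natCast]
    rw [← hlen, List.take_length]
  rw [hA, hB]
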